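-- pv_equiv track=rewrite | github.com/angelowen/Footprintku | 初賽/code/Done10.py | extract_peek_ranges_from_array
-- ===== SOURCE A (Python) =====
-- def extract_peek_ranges_from_array(array_vals, minimun_val, minimun_range):
--     start_i = None
--     end_i = None
--     peek_ranges = []
--     #enumerate() 函數用於將數據對象組合為一個索引序列，同時列出數據和數據下標
--     for i, val in enumerate(array_vals):
--         if val > minimun_val and start_i is None:
--             start_i = i
--         elif val > minimun_val and start_i is not None:
--             pass
--         elif val < minimun_val and start_i is not None:
--             end_i = i
--             if end_i - start_i >= minimun_range:
--                 peek_ranges.append((start_i, end_i))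
--             start_i = None
--             end_i = None
--         elif val < minimun_val and start_i is None:
--             pass
--         else:
--             raise ValueError("cannot parse this case...")
--     return peek_ranges
-- ===== SOURCE B (Python) =====
-- import itertools
--
-- def extract_peek_ranges_from_array(array_vals, minimun_val, minimun_range):
--     for v in array_vals:
--         if v == minimun_val:
--             raise ValueError("cannot parse this case...")
--     peek_ranges = []
--     start = None
--     idx = 0
--     for key, grp in itertools.groupby(array_vals, key=lambda v: v > minimun_val):
--         n = sum(1 for _ in grp)
--         if key:
--             start = idx
--         else:
--             if start is not None:
--                 if idx - start >= minimun_range: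
--                     peek_ranges.append((start, idx))
--                 start = None
--         idx += n
--     return peek_ranges
-- ===== Notes on version B (the rewrite author's own statement) =====
-- stated objective: alternative
-- what changed: B replaces A's per-element state machine by a validation pass plus an itertools.groupby run-length decomposition: it folds over maximal constant runs of (v > minimun_val), opening a range at each above-run and closing it at the start of the next below-run.
import Mathlib
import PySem

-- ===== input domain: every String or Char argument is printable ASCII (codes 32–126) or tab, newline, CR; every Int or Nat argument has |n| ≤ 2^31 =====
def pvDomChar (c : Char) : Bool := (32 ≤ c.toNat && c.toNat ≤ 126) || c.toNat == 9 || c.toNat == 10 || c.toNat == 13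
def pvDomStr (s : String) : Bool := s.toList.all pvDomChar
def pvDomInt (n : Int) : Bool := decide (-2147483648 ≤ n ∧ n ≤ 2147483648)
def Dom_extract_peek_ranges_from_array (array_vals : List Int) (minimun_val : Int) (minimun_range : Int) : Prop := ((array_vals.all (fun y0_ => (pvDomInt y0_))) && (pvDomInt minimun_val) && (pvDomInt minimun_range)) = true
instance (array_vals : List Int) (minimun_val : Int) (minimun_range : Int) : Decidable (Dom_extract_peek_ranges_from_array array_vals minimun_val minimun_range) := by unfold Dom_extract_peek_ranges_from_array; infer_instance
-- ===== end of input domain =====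

-- B re-implements A's per-element state machine as a run-length (groupby) fold; same cost,
-- different decomposition. Both Pythons raise ValueError iff some element equals minimun_val
-- (excluded by Pre_); the equivalence is about the return value on all other inputs.

-- ===== PORT A =====
-- literal port of A: enumerate-loop = structural recursion carrying the index i,
-- the optional start index and the accumulated ranges
def aloop (m minr : Int) : List Int → Int → Option Int → List (Int × Int) → List (Int × Int)
  | [], _, _, acc => acc
  | v :: vs, i, s, acc =>
    if v > m ∧ s = none then aloop m minr vs (i + 1) (some i) acc
    else if v > m then aloop m minr vs (i + 1) s acc
    else if v < m ∧ s ≠ none then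
      aloop m minr vs (i + 1) none
        (if i - s.getD 0 ≥ minr then acc ++ [(s.getD 0, i)] else acc)
    else if v < m then aloop m minr vs (i + 1) s acc
    else acc  -- Python: raise ValueError("cannot parse this case...") — excluded by Pre_

def extract_peek_ranges_from_array (array_vals : List Int) (minimun_val : Int) (minimun_range : Int) : List (Int × Int) :=
  aloop minimun_val minimun_range array_vals 0 none []

-- ===== PORT B =====
-- takeWhile/dropWhile on the key (v > m) = k : the maximal leading constant run and the rest
def spanKey (m : Int) (k : Bool) : List Int → List Int × List Int
  | [] => ([], [])
  | x :: xs =>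
    if decide (x > m) = k then
      let s := spanKey m k xs
      (x :: s.1, s.2)
    else ([], x :: xs)

theorem spanKey_snd_length_le (m : Int) (k : Bool) : ∀ l : List Int, (spanKey m k l).2.length ≤ l.length := by
  intro l
  induction l with
  | nil => simp [spanKey]
  | cons x xs ih =>
    simp only [spanKey]
    split
    · simpa using Nat.le_succ_of_le ih
    · simp

-- itertools.groupby(array_vals, key=λ v, v > m) as (key, run length) pairs
def runs (m : Int) : List Int → List (Bool × Nat)
  | [] => []
  | x :: xs =>
    let k := decide (x > m)
    let s := spanKey m k xs
    (k, s.1.length + 1) :: runs m s.2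
termination_by l => l.length
decreasing_by
  exact Nat.lt_succ_of_le (spanKey_snd_length_le m (decide (x > m)) xs)

-- the fold over runs: open at an above-run, close at the start of a below-run
def bloop (minr : Int) : List (Bool × Nat) → Int → Option Int → List (Int × Int) → List (Int × Int)
  | [], _, _, acc => acc
  | (k, n) :: rs, idx, start, acc =>
    if k then bloop minr rs (idx + n) (some idx) acc
    else
      match start with
      | some s =>
        bloop minr rs (idx + n) none
          (if idx - s ≥ minr then acc ++ [(s, idx)] else acc)
      | none => bloop minr rs (idx + n) none acc

def extract_peek_ranges_from_array_alt (array_vals : List Int) (minimun_val : Int) (minimun_range : Int) : List (Int × Int) :=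
  -- Python B first raises ValueError if any element equals minimun_val (excluded by Pre_)
  if array_vals.any (fun v => v == minimun_val) then []
  else bloop minimun_range (runs minimun_val array_vals) 0 none []

-- ===== PRECONDITION & SPEC =====
-- Pre_ excludes exactly the inputs on which both Pythons raise ValueError:
-- some element equal to minimun_val.
def Pre_extract_peek_ranges_from_array (array_vals : List Int) (minimun_val : Int) (minimun_range : Int) : Prop :=
  minimun_val ∉ array_vals
instance (array_vals : List Int) (minimun_val : Int) (minimun_range : Int) : Decidable (Pre_extract_peek_ranges_from_array array_vals minimun_val minimun_range) := by unfold Pre_extract_peek_ranges_from_array; infer_instance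

def pvWitness_extract_peek_ranges_from_array : List Int × Int × Int := ([2, 3, 0, 4, 0], 1, 2)

def Spec_extract_peek_ranges_from_array (array_vals : List Int) (minimun_val : Int) (minimun_range : Int) (out : List (Int × Int)) : Prop := out = extract_peek_ranges_from_array_alt array_vals minimun_val minimun_range
instance (array_vals : List Int) (minimun_val : Int) (minimun_range : Int) (out : List (Int × Int)) : Decidable (Spec_extract_peek_ranges_from_array array_vals minimun_val minimun_range out) := by unfold Spec_extract_peek_ranges_from_array; infer_instance

-- ===== CLAIM (what is proved, stated in full; the proofs are below) =====
def Claim_equal_extract_peek_ranges_from_array : Prop := ∀ (array_vals : List Int) (minimun_val : Int) (minimun_range : Int), Dom_extract_peek_ranges_from_array array_vals minimun_val minimun_range → Pre_extract_peek_ranges_from_array array_vals minimun_val minimun_range → Spec_extract_peek_ranges_from_array array_vals minimun_val minimun_range (extract_peek_ranges_from_array array_vals minimun_val minimun_range)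

-- ===== LEMMAS AND PROOFS =====

-- step lemmas for the two loops (one per branch actually taken)
theorem aloop_open (m minr v i : Int) (vs : List Int) (acc : List (Int × Int)) (hv : v > m) :
    aloop m minr (v :: vs) i none acc = aloop m minr vs (i + 1) (some i) acc := by
  simp [aloop, hv]

theorem aloop_skip_above (m minr v i j : Int) (vs : List Int) (acc : List (Int × Int)) (hv : v > m) :
    aloop m minr (v :: vs) i (some j) acc = aloop m minr vs (i + 1) (some j) acc := by
  simp [aloop, hv]

theorem aloop_close (m minr v i j : Int) (vs : List Int) (acc : List (Int × Int)) (hv : v < m) :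
    aloop m minr (v :: vs) i (some j) acc
      = aloop m minr vs (i + 1) none (if i - j ≥ minr then acc ++ [(j, i)] else acc) := by
  simp [aloop, hv, show ¬ v > m by omega]

theorem aloop_skip_below (m minr v i : Int) (vs : List Int) (acc : List (Int × Int)) (hv : v < m) :
    aloop m minr (v :: vs) i none acc = aloop m minr vs (i + 1) none acc := by
  simp [aloop, hv, show ¬ v > m by omega]

theorem bloop_true (minr : Int) (n : Nat) (rs : List (Bool × Nat)) (idx : Int) (start : Option Int) (acc : List (Int × Int)) :
    bloop minr ((true, n) :: rs) idx start acc = bloop minr rs (idx + n) (some idx) acc := by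
  simp [bloop]

theorem bloop_false_some (minr : Int) (n : Nat) (rs : List (Bool × Nat)) (idx s : Int) (acc : List (Int × Int)) :
    bloop minr ((false, n) :: rs) idx (some s) acc
      = bloop minr rs (idx + n) none (if idx - s ≥ minr then acc ++ [(s, idx)] else acc) := by
  simp [bloop]

theorem bloop_false_none (minr : Int) (n : Nat) (rs : List (Bool × Nat)) (idx : Int) (acc : List (Int × Int)) :
    bloop minr ((false, n) :: rs) idx none acc = bloop minr rs (idx + n) none acc := by
  simp [bloop]

theorem spanKey_append (m : Int) (k : Bool) : ∀ l : List Int, (spanKey m k l).1 ++ (spanKey m k l).2 = l := by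
  intro l
  induction l with
  | nil => simp [spanKey]
  | cons x xs ih =>
    simp only [spanKey]
    split
    · simpa using ih
    · simp

theorem spanKey_all (m : Int) (k : Bool) : ∀ l : List Int, ∀ v ∈ (spanKey m k l).1, decide (v > m) = k := by
  intro l
  induction l with
  | nil => simp [spanKey]
  | cons x xs ih =>
    simp only [spanKey]
    split
    · rename_i h
      intro v hv
      rcases List.mem_cons.mp hv with rfl | hv
      · exact h
      · exact ih v hv
    · simp

theorem spanKey_rest (m : Int) (k : Bool) : ∀ l : List Int, (spanKey m k l).2 = [] ∨ ∃ y ys, (spanKey m k l).2 = y :: ys ∧ decide (y > m) ≠ k := by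
  intro l
  induction l with
  | nil => simp [spanKey]
  | cons x xs ih =>
    simp only [spanKey]
    split
    · simpa using ih
    · rename_i h
      exact Or.inr ⟨x, xs, rfl, h⟩

-- while the values stay above m and start is set, A's loop just advances
theorem aloop_above (m minr : Int) : ∀ p : List Int, (∀ v ∈ p, v > m) → ∀ rest i j acc,
    aloop m minr (p ++ rest) i (some j) acc = aloop m minr rest (i + p.length) (some j) acc := by
  intro p
  induction p with
  | nil => intro _ rest i j acc; simp
  | cons x xs ih =>
    intro hall rest i j acc
    have hx : x > m := hall x (List.mem_cons_self ..)
    have hxs : ∀ v ∈ xs, v > m := fun v hv => hall v (List.mem_cons_of_mem _ hv)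
    rw [List.cons_append, aloop_skip_above m minr x i j _ acc hx, ih hxs]
    congr 1
    push_cast [List.length_cons]
    ring

-- while the values stay below m and start is unset, A's loop just advances
theorem aloop_below (m minr : Int) : ∀ p : List Int, (∀ v ∈ p, v < m) → ∀ rest i acc,
    aloop m minr (p ++ rest) i none acc = aloop m minr rest (i + p.length) none acc := by
  intro p
  induction p with
  | nil => intro _ rest i acc; simp
  | cons x xs ih =>
    intro hall rest i acc
    have hx : x < m := hall x (List.mem_cons_self ..)
    have hxs : ∀ v ∈ xs, v < m := fun v hv => hall v (List.mem_cons_of_mem _ hv)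
    rw [List.cons_append, aloop_skip_below m minr x i _ acc hx, ih hxs]
    congr 1
    push_cast [List.length_cons]
    ring

-- main invariant: on lists avoiding m, the state machine equals the run fold.
-- Strong induction on the length; the `some` start state is handled inline for the
-- rest of the list after an above-run (whose head, if any, is below m).
theorem aloop_eq_bloop (m minr : Int) : ∀ n : Nat, ∀ l : List Int, l.length ≤ n → (∀ v ∈ l, v ≠ m) → ∀ i acc,
    aloop m minr l i none acc = bloop minr (runs m l) i none acc := by
  intro n
  induction n with
  | zero =>
    intro l hl _ i acc
    have : l = [] := List.eq_nil_of_length_eq_zero (Nat.le_zero.mp hl)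
    subst this
    simp [aloop, runs, bloop]
  | succ n ih =>
    intro l hl hne i acc
    cases l with
    | nil => simp [aloop, runs, bloop]
    | cons x xs =>
      by_cases hx : x > m
      · -- above-run of length (p.length + 1)
        have hk : decide (x > m) = true := by simpa using hx
        have hsplit := spanKey_append m true xs
        have hall : ∀ v ∈ (spanKey m true xs).1, v > m := by
          intro v hv
          simpa using spanKey_all m true xs v hv
        -- A: first step opens at i, then skips the rest of the run
        have hA : aloop m minr (x :: xs) i none acc
            = aloop m minr (spanKey m true xs).2 (i + 1 + (spanKey m true xs).1.length) (some i) acc := by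
          rw [aloop_open m minr x i xs acc hx]
          conv_lhs => rw [← hsplit]
          exact aloop_above m minr _ hall _ _ _ _
        have hB : runs m (x :: xs) = (true, (spanKey m true xs).1.length + 1) :: runs m (spanKey m true xs).2 := by
          rw [runs]
          simp [hk]
        rw [hA, hB, bloop_true]
        -- now the rest: either empty, or starts with a below element
        set r := (spanKey m true xs).2 with hr
        have hrlen : r.length ≤ n := by
          have h1 : r.length ≤ xs.length := spanKey_snd_length_le m true xs
          simp at hl
          omega
        have hrne : ∀ v ∈ r, v ≠ m := by
          intro v hv
          apply hne
          rw [List.mem_cons]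
          right
          rw [← hsplit]
          exact List.mem_append_right _ hv
        have hidx : i + 1 + ((spanKey m true xs).1.length : Int)
            = i + (((spanKey m true xs).1.length + 1 : Nat) : Int) := by push_cast; ring
        rcases spanKey_rest m true xs with hnil | ⟨y, ys, hys, hyk⟩
        · rw [← hr] at hnil
          rw [hnil]
          simp [aloop, runs, bloop]
        · rw [← hr] at hys
          have hy : y < m := by
            have h1 : ¬ y > m := by simpa using hyk
            have h2 : y ≠ m := hrne y (by rw [hys]; exact List.mem_cons_self ..)
            omega
          -- A: the below element closes the range; B: the below-run closes it
          have hsplit2 := spanKey_append m false ys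
          have hall2 : ∀ v ∈ (spanKey m false ys).1, v < m := by
            intro v hv
            have h1 : ¬ v > m := by simpa using spanKey_all m false ys v hv
            have h2 : v ≠ m := by
              apply hrne
              rw [hys, List.mem_cons]
              right
              rw [← hsplit2]
              exact List.mem_append_left _ hv
            omega
          have hBr : runs m (y :: ys) = (false, (spanKey m false ys).1.length + 1) :: runs m (spanKey m false ys).2 := by
            rw [runs]
            simp [show ¬ y > m by omega]
          rw [hys, aloop_close m minr y _ i ys acc hy, hBr, bloop_false_some, ← hidx]
          conv_lhs => rw [← hsplit2]
          rw [aloop_below m minr _ hall2]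
          have hr2len : (spanKey m false ys).2.length ≤ n := by
            have h1 : (spanKey m false ys).2.length ≤ ys.length := spanKey_snd_length_le m false ys
            have h2 : r.length ≤ xs.length := spanKey_snd_length_le m true xs
            have h3 : r.length = ys.length + 1 := by rw [hys]; simp
            simp at hl
            omega
          have hr2ne : ∀ v ∈ (spanKey m false ys).2, v ≠ m := by
            intro v hv
            apply hrne
            rw [hys, List.mem_cons]
            right
            rw [← hsplit2]
            exact List.mem_append_right _ hv
          rw [ih _ hr2len hr2ne]
          congr 1
          push_cast
          ring
      · -- below-run: x < m since x ≠ m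
        have hx' : x < m := by
          have := hne x (List.mem_cons_self ..)
          omega
        have hsplit := spanKey_append m false xs
        have hall : ∀ v ∈ (spanKey m false xs).1, v < m := by
          intro v hv
          have h1 : ¬ v > m := by simpa using spanKey_all m false xs v hv
          have h2 : v ≠ m := by
            apply hne
            rw [List.mem_cons]
            right
            rw [← hsplit]
            exact List.mem_append_left _ hv
          omega
        have hA : aloop m minr (x :: xs) i none acc
            = aloop m minr (spanKey m false xs).2 (i + 1 + (spanKey m false xs).1.length) none acc := by
          rw [aloop_skip_below m minr x i xs acc hx']
          conv_lhs => rw [← hsplit]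
          exact aloop_below m minr _ hall _ _ _
        have hB : runs m (x :: xs) = (false, (spanKey m false xs).1.length + 1) :: runs m (spanKey m false xs).2 := by
          rw [runs]
          simp [hx]
        rw [hA, hB, bloop_false_none]
        have hrlen : (spanKey m false xs).2.length ≤ n := by
          have h1 : (spanKey m false xs).2.length ≤ xs.length := spanKey_snd_length_le m false xs
          simp at hl
          omega
        have hrne : ∀ v ∈ (spanKey m false xs).2, v ≠ m := by
          intro v hv
          apply hne
          rw [List.mem_cons]
          right
          rw [← hsplit]
          exact List.mem_append_right _ hv
        rw [ih _ hrlen hrne]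
        congr 1
        push_cast
        ring

-- ===== VERDICT (by name: the statement is the Claim_ definition above) =====
theorem extract_peek_ranges_from_array_spec : Claim_equal_extract_peek_ranges_from_array := by
  intro array_vals minimun_val minimun_range _ hpre
  unfold Spec_extract_peek_ranges_from_array
  unfold extract_peek_ranges_from_array extract_peek_ranges_from_array_alt
  have hguard : array_vals.any (fun v => v == minimun_val) = false := by
    simp only [List.any_eq_false, beq_iff_eq]
    intro v hv h
    exact hpre (h ▸ hv)
  rw [hguard]
  simp only [Bool.false_eq_true, if_false]
  exact aloop_eq_bloop minimun_val minimun_range array_vals.length array_vals le_rfl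
    (fun v hv h => hpre (h ▸ hv)) 0 []
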